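-- pv_equiv track=rewrite | github.com/KazukiNoSuzaku/Leetcode | Python/1879_Minimum_XOR_Sum_of_Two_Arrays.py | minimumXORSum
-- ===== SOURCE A (Python) =====
-- def minimumXORSum(nums1, nums2):
--     """
--     :type nums1: List[int]
--     :type nums2: List[int]
--     :rtype: int
--     """
--     n = len(nums1)
--     dp = [float('inf')] * (1 << n)
--     dp[0] = 0
--     for mask in range(1 << n):
--         i = bin(mask).count('1')
--         if i >= n:
--             continue
--         for j in range(n):
--             if not (mask & (1 << j)):
--                 new_mask = mask | (1 << j)
--                 dp[new_mask] = min(dp[new_mask], dp[mask] + (nums1[i] ^ nums2[j]))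
--     return dp[(1 << n) - 1]
-- ===== SOURCE B (Python) =====
-- def minimumXORSum(nums1, nums2):
--     """Top-down memoized ("pull") recursion over the mask of used nums2-slots,
--     with a dict cache, instead of A's bottom-up "push" table over all masks."""
--     n = len(nums1)
--     memo = {0: 0}
--
--     def solve(mask):
--         if mask in memo:
--             return memo[mask]
--         i = bin(mask).count('1') - 1
--         best = min((nums1[i] ^ nums2[j]) + solve(mask ^ (1 << j))
--                    for j in range(n) if mask & (1 << j))
--         memo[mask] = best
--         return best
--
--     return solve((1 << n) - 1)
-- ===== Notes on version B (the rewrite author's own statement) =====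
-- stated objective: alternative
-- what changed: Replaces A's bottom-up push-style table over all 2^n masks (an array, forward-propagating dp[mask] into dp[mask|bit]) with a top-down memoized pull-style recursion from the full mask that computes each state from its sub-states on demand via a dict cache.
import Mathlib
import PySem

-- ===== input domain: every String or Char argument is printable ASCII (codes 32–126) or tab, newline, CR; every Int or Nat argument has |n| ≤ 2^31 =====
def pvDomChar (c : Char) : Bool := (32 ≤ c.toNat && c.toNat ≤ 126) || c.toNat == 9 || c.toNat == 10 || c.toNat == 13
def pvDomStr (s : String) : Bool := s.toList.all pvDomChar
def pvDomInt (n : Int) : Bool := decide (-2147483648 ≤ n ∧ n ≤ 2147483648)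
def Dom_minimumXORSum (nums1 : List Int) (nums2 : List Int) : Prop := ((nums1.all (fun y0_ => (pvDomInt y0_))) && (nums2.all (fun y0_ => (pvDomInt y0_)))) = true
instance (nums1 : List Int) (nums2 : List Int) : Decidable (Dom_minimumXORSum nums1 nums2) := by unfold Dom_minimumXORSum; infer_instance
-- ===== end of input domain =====

-- B replaces A's bottom-up "push" DP table over all 2^n masks with a top-down
-- memoized "pull" recursion from the full mask (dict cache); same exact results.


-- ===== PORT A =====
-- Python's min over {ints} ∪ {float('inf')}: none plays float('inf')
def pvMinO : Option Int → Option Int → Option Int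
  | none, b => b
  | some a, none => some a
  | some a, some b => some (min a b)

-- body of A's outer loop: one 'mask' iteration (the popcount guard and the inner 'for j in range(n)')
def pvStepA (nums1 nums2 : List Int) (n : Nat) (dp : List (Option Int)) (mask : Nat) : List (Option Int) :=
  let i := PySem.Int.bitCount (mask : Int)          -- i = bin(mask).count('1')
  if n ≤ i then dp                                   -- if i >= n: continue
  else (List.range n).foldl (fun dp j =>
    if mask.testBit j then dp                        -- if not (mask & (1 << j)): … update … (else skip)
    else
      let newMask := mask ||| (1 <<< j)
      dp.set newMask (pvMinO (dp.getD newMask none)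
        (Option.map (fun v => v + PySem.Int.bxor ((PySem.List.pyGet? nums1 (i : Int)).getD 0)
                                                  ((PySem.List.pyGet? nums2 (j : Int)).getD 0))
          (dp.getD mask none)))) dp                  -- dp[new] = min(dp[new], dp[mask] + (nums1[i]^nums2[j]))

def minimumXORSum (nums1 : List Int) (nums2 : List Int) : Int :=
  let n := nums1.length
  let dp : List (Option Int) := (List.replicate (1 <<< n) (none : Option Int)).set 0 (some 0)
  let dp := (List.range (1 <<< n)).foldl (pvStepA nums1 nums2 n) dp
  ((dp.getD (1 <<< n - 1) none).getD 0)              -- return dp[(1<<n)-1]; proved below to always be an int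

-- ===== PORT B =====
-- B's recursive 'solve', memo dict threaded through; fuel n+1 (> recursion depth) makes it total
def pvSolveB (nums1 nums2 : List Int) (n : Nat) :
    Nat → Nat → PySem.Dict Nat Int → Int × PySem.Dict Nat Int
  | 0, _, memo => (0, memo)                          -- fuel exhausted: unreachable from the initial fuel
  | fuel+1, mask, memo =>
    match PySem.Dict.get? memo mask with
    | some v => (v, memo)                            -- if mask in memo: return memo[mask]
    | none =>
      let i : Int := (PySem.Int.bitCount (mask : Int) : Int) - 1   -- i = bin(mask).count('1') - 1
      let st := (List.range n).foldl (fun (st : Option Int × PySem.Dict Nat Int) j =>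
        if mask.testBit j then                       -- … for j in range(n) if mask & (1 << j)
          let c := PySem.Int.bxor ((PySem.List.pyGet? nums1 i).getD 0)
                                  ((PySem.List.pyGet? nums2 (j : Int)).getD 0)
          let r := pvSolveB nums1 nums2 n fuel (mask ^^^ (1 <<< j)) st.2
          (some (match st.1 with | none => c + r.1 | some b => min b (c + r.1)), r.2)
        else st) (none, memo)                        -- running min of (nums1[i]^nums2[j]) + solve(mask^(1<<j))
      let best := st.1.getD 0                        -- min(…): proved below to never see the empty generator
      (best, PySem.Dict.insert st.2 mask best)       -- memo[mask] = best

def minimumXORSum_alt (nums1 : List Int) (nums2 : List Int) : Int :=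
  let n := nums1.length
  let memo : PySem.Dict Nat Int := PySem.Dict.insert PySem.Dict.empty 0 0   -- memo = {0: 0}
  (pvSolveB nums1 nums2 n (n + 1) (1 <<< n - 1) memo).1                     -- return solve((1 << n) - 1)

-- ===== PRECONDITION & SPEC =====
-- Pre_ excludes exactly the inputs where Python A raises IndexError (nums2 shorter than a
-- nonempty nums1: A reads nums2[j] for all j < len(nums1)); B raises there too.
def Pre_minimumXORSum (nums1 : List Int) (nums2 : List Int) : Prop :=
  nums1.length ≤ nums2.length ∨ nums1 = []
instance (nums1 : List Int) (nums2 : List Int) : Decidable (Pre_minimumXORSum nums1 nums2) := by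
  unfold Pre_minimumXORSum; infer_instance

def pvWitness_minimumXORSum : List Int × List Int := ([1, 2], [2, 3])

def Spec_minimumXORSum (nums1 : List Int) (nums2 : List Int) (out : Int) : Prop := out = minimumXORSum_alt nums1 nums2
instance (nums1 : List Int) (nums2 : List Int) (out : Int) : Decidable (Spec_minimumXORSum nums1 nums2 out) := by unfold Spec_minimumXORSum; infer_instance

-- ===== CLAIM (what is proved, stated in full; the proofs are below) =====
def Claim_equal_minimumXORSum : Prop := ∀ (nums1 : List Int) (nums2 : List Int), Dom_minimumXORSum nums1 nums2 → Pre_minimumXORSum nums1 nums2 → Spec_minimumXORSum nums1 nums2 (minimumXORSum nums1 nums2)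

-- ===== LEMMAS AND PROOFS =====
-- ---- pvMinO algebra and the generic min-fold ----
theorem pvMinO_none_left (b : Option Int) : pvMinO none b = b := rfl
theorem pvMinO_none_right (a : Option Int) : pvMinO a none = a := by cases a <;> rfl
theorem pvMinO_comm (a b : Option Int) : pvMinO a b = pvMinO b a := by
  cases a <;> cases b <;> simp [pvMinO, min_comm]
theorem pvMinO_assoc (a b c : Option Int) : pvMinO (pvMinO a b) c = pvMinO a (pvMinO b c) := by
  cases a <;> cases b <;> cases c <;> simp [pvMinO, min_assoc]
theorem pvMinO_isSome_left {a : Option Int} (b : Option Int) (h : a.isSome) : (pvMinO a b).isSome := by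
  cases a <;> cases b <;> simp_all [pvMinO]
theorem pvMinO_isSome_right (a : Option Int) (x : Int) : (pvMinO a (some x)).isSome := by
  cases a <;> simp [pvMinO]
def pvFoldMin (f : Nat → Option Int) (C : Nat → Bool) (l : List Nat) (a0 : Option Int) : Option Int :=
  l.foldl (fun acc j => if C j then pvMinO acc (f j) else acc) a0
theorem pvFoldMin_nil (f C a0) : pvFoldMin f C [] a0 = a0 := rfl
theorem pvFoldMin_cons (f C a0 j l) :
    pvFoldMin f C (j :: l) a0 = pvFoldMin f C l (if C j then pvMinO a0 (f j) else a0) := rfl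
theorem pvFoldMin_false {f C l a0} (h : ∀ j ∈ l, C j = false) : pvFoldMin f C l a0 = a0 := by
  induction l with
  | nil => rfl
  | cons j l ih =>
    rw [pvFoldMin_cons, h j (by simp)]
    simp only [Bool.false_eq_true, if_false]
    exact ih (fun x hx => h x (by simp [hx]))
theorem pvFoldMin_acc (f : Nat → Option Int) (C : Nat → Bool) (l : List Nat) (a0 : Option Int) :
    pvFoldMin f C l a0 = pvMinO a0 (pvFoldMin f C l none) := by
  induction l generalizing a0 with
  | nil => simp [pvFoldMin_nil, pvMinO_none_right]
  | cons j l ih =>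
    rw [pvFoldMin_cons, pvFoldMin_cons]
    by_cases h : C j
    · simp only [h, if_true]
      rw [ih (pvMinO a0 (f j)), ih (pvMinO none (f j)), pvMinO_none_left, pvMinO_assoc]
    · simp only [h]
      exact ih a0
theorem pvFoldMin_congr {f g : Nat → Option Int} {C C' : Nat → Bool} {l a0} (hC : ∀ j ∈ l, C j = C' j)
    (hf : ∀ j ∈ l, C j = true → f j = g j) : pvFoldMin f C l a0 = pvFoldMin g C' l a0 := by
  induction l generalizing a0 with
  | nil => rfl
  | cons j l ih =>
    rw [pvFoldMin_cons, pvFoldMin_cons, ← hC j (by simp)]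
    by_cases h : C j
    · simp only [h, if_true, hf j (by simp) h]
      exact ih (fun x hx => hC x (by simp [hx])) (fun x hx hx2 => hf x (by simp [hx]) hx2)
    · simp only [h, Bool.false_eq_true, if_false]
      exact ih (fun x hx => hC x (by simp [hx])) (fun x hx hx2 => hf x (by simp [hx]) hx2)
theorem pvFoldMin_insert {f : Nat → Option Int} {C C' : Nat → Bool} {l : List Nat} {a0 j0}
    (hnd : l.Nodup) (hm : j0 ∈ l)
    (hC0 : C j0 = false) (hC0' : C' j0 = true) (hC : ∀ j ∈ l, j ≠ j0 → C' j = C j) :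
    pvFoldMin f C' l a0 = pvMinO (pvFoldMin f C l a0) (f j0) := by
  induction l generalizing a0 with
  | nil => simp at hm
  | cons j l ih =>
    rcases List.mem_cons.mp hm with rfl | hmem
    · have hnj : j0 ∉ l := (List.nodup_cons.mp hnd).1
      rw [pvFoldMin_cons, pvFoldMin_cons, hC0, hC0']
      simp only [if_true, Bool.false_eq_true, if_false]
      have : pvFoldMin f C' l (pvMinO a0 (f j0)) = pvFoldMin f C l (pvMinO a0 (f j0)) :=
        pvFoldMin_congr (fun x hx => hC x (by simp [hx]) (fun e => hnj (e ▸ hx))) (fun _ _ _ => rfl)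
      rw [this, pvFoldMin_acc f C l (pvMinO a0 (f j0)), pvFoldMin_acc f C l a0,
        pvMinO_assoc, pvMinO_comm (f j0), ← pvMinO_assoc]
    · have hjj0 : j ≠ j0 := fun e => (List.nodup_cons.mp hnd).1 (e ▸ hmem)
      rw [pvFoldMin_cons, pvFoldMin_cons, hC j (by simp) hjj0]
      exact ih (List.nodup_cons.mp hnd).2 hmem
        (fun x hx hne => hC x (by simp [hx]) hne)
theorem pvFoldMin_isSome {f : Nat → Option Int} {C : Nat → Bool} {l a0 j0} (hm : j0 ∈ l)
    (hC : C j0 = true) (hf : (f j0).isSome) : (pvFoldMin f C l a0).isSome := by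
  induction l generalizing a0 with
  | nil => simp at hm
  | cons j l ih =>
    rw [pvFoldMin_cons]
    rcases List.mem_cons.mp hm with rfl | hmem
    · rw [hC]; simp only [if_true]
      rw [pvFoldMin_acc]
      rcases Option.isSome_iff_exists.mp hf with ⟨x, hx⟩
      exact pvMinO_isSome_left _ (by rw [hx]; exact pvMinO_isSome_right _ _)
    · exact ih hmem
-- ---- popcount (pvBC) and bit facts ----
def pvBC (m : Nat) : Nat := PySem.Int.bitCount (m : Int)
theorem pvBC_zero : pvBC 0 = 0 := by decide
theorem pvBC_rec (m : Nat) : pvBC m = m % 2 + pvBC (m / 2) := by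
  rcases Nat.eq_zero_or_pos m with h | h
  · subst h; decide
  · exact PySem.Int.bitCount_natCast h
theorem pvBC_pos {m : Nat} (h : m ≠ 0) : 1 ≤ pvBC m := by
  induction m using Nat.strongRecOn with
  | _ m ih =>
    rw [pvBC_rec]
    rcases Nat.eq_zero_or_pos (m % 2) with h2 | h2
    · have hm : m / 2 ≠ 0 := by omega
      have := ih (m / 2) (by omega) hm
      omega
    · omega
theorem pvBC_xor_pow {m j : Nat} (h : m.testBit j = true) : pvBC (m ^^^ 2 ^ j) + 1 = pvBC m := by
  induction j generalizing m with
  | zero =>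
    have h0 : m % 2 = 1 := by simpa [Nat.testBit_zero] using h
    have e1 : (m ^^^ 2 ^ 0) % 2 = 0 := by
      rw [Nat.xor_mod_two_eq]; omega
    have e2 : (m ^^^ 2 ^ 0) / 2 = m / 2 := by
      rw [Nat.xor_div_two]; norm_num
    rw [pvBC_rec (m ^^^ 2 ^ 0), e1, e2, pvBC_rec m, h0]; omega
  | succ j ih =>
    have h' : (m / 2).testBit j = true := by
      rw [Nat.testBit_div_two]; exact h
    have e1 : (m ^^^ 2 ^ (j+1)) % 2 = m % 2 := by
      rw [Nat.xor_mod_two_eq, Nat.pow_succ]; omega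
    have e2 : (m ^^^ 2 ^ (j+1)) / 2 = m / 2 ^^^ 2 ^ j := by
      rw [Nat.xor_div_two, Nat.pow_succ, Nat.mul_div_cancel]; omega
    rw [pvBC_rec (m ^^^ 2 ^ (j+1)), e1, e2, pvBC_rec m]
    have := ih h'
    omega
theorem pvBC_or_pow {m j : Nat} (h : m.testBit j = false) : pvBC (m ||| 2 ^ j) = pvBC m + 1 := by
  induction j generalizing m with
  | zero =>
    have h0 : m % 2 = 0 := by
      have := Nat.testBit_zero m; simp [this] at h; omega
    have e1 : (m ||| 2 ^ 0) % 2 = 1 := by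
      have h1 : (m ||| 2 ^ 0).testBit 0 = true := by
        simp
      rw [Nat.testBit_zero, decide_eq_true_eq] at h1
      exact h1
    have e2 : (m ||| 2 ^ 0) / 2 = m / 2 := by
      rw [Nat.or_div_two]; norm_num
    rw [pvBC_rec (m ||| 2 ^ 0), e1, e2, pvBC_rec m, h0]; omega
  | succ j ih =>
    have h' : (m / 2).testBit j = false := by
      rw [Nat.testBit_div_two]; exact h
    have e1 : (m ||| 2 ^ (j+1)) % 2 = m % 2 := by
      have t0 : (m ||| 2 ^ (j+1)).testBit 0 = m.testBit 0 := by
        simp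
      rw [Nat.testBit_zero, Nat.testBit_zero] at t0
      rcases Nat.mod_two_eq_zero_or_one m with h2 | h2 <;>
        rcases Nat.mod_two_eq_zero_or_one (m ||| 2 ^ (j+1)) with h3 | h3 <;> simp_all
    have e2 : (m ||| 2 ^ (j+1)) / 2 = m / 2 ||| 2 ^ j := by
      rw [Nat.or_div_two, Nat.pow_succ, Nat.mul_div_cancel]; omega
    rw [pvBC_rec (m ||| 2 ^ (j+1)), e1, e2, pvBC_rec m]
    have := ih h'
    omega
theorem pvBC_le {m n : Nat} (h : m < 2 ^ n) : pvBC m ≤ n := by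
  induction n generalizing m with
  | zero => interval_cases m; decide
  | succ n ih =>
    rw [pvBC_rec]
    have : m / 2 < 2 ^ n := by omega
    have := ih this
    omega
theorem pvBC_full (n : Nat) : pvBC (2 ^ n - 1) = n := by
  induction n with
  | zero => decide
  | succ n ih =>
    rw [pvBC_rec]
    have h1 : (2 ^ (n+1) - 1) % 2 = 1 := by
      have : 2 ^ (n+1) = 2 * 2 ^ n := by ring
      have hp : 0 < 2 ^ n := Nat.two_pow_pos n
      omega
    have h2 : (2 ^ (n+1) - 1) / 2 = 2 ^ n - 1 := by
      have : 2 ^ (n+1) = 2 * 2 ^ n := by ring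
      have hp : 0 < 2 ^ n := Nat.two_pow_pos n
      omega
    rw [h1, h2, ih]; omega
theorem pvBC_ge_full {m n : Nat} (h : m < 2 ^ n) (h2 : n ≤ pvBC m) : m = 2 ^ n - 1 := by
  induction n generalizing m with
  | zero => omega
  | succ n ih =>
    have hlt : m / 2 < 2 ^ n := by omega
    have hle := pvBC_le hlt
    rw [pvBC_rec] at h2
    have hm2 : m % 2 = 1 := by omega
    have := ih hlt (by omega)
    have h2n : 2 ^ (n+1) = 2 * 2 ^ n := by ring
    omega
theorem pv_xor_pow_lt {m j : Nat} (h : m.testBit j = true) : m ^^^ 2 ^ j < m := by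
  induction j generalizing m with
  | zero =>
    have h0 : m % 2 = 1 := by simpa [Nat.testBit_zero] using h
    have e1 : (m ^^^ 2 ^ 0) % 2 = 0 := by rw [Nat.xor_mod_two_eq]; omega
    have e2 : (m ^^^ 2 ^ 0) / 2 = m / 2 := by rw [Nat.xor_div_two]; norm_num
    omega
  | succ j ih =>
    have h' : (m / 2).testBit j = true := by rw [Nat.testBit_div_two]; exact h
    have e1 : (m ^^^ 2 ^ (j+1)) % 2 = m % 2 := by rw [Nat.xor_mod_two_eq, Nat.pow_succ]; omega
    have e2 : (m ^^^ 2 ^ (j+1)) / 2 = m / 2 ^^^ 2 ^ j := by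
      rw [Nat.xor_div_two, Nat.pow_succ, Nat.mul_div_cancel]; omega
    have := ih h'
    omega
theorem pv_or_pow_xor {t j : Nat} (h : t.testBit j = false) : (t ||| 2 ^ j) ^^^ 2 ^ j = t := by
  apply Nat.eq_of_testBit_eq
  intro i
  by_cases hij : i = j
  · subst hij; simp [Nat.testBit_xor, Nat.testBit_or, h]
  · simp [Nat.testBit_xor, Nat.testBit_or, Ne.symm hij]
theorem pv_src_target {m t j : Nat} :
    (m.testBit j = true ∧ m ^^^ 2 ^ j = t) ↔ (t.testBit j = false ∧ m = t ||| 2 ^ j) := by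
  constructor
  · rintro ⟨hb, rfl⟩
    constructor
    · simp [Nat.testBit_xor, hb]
    · apply Nat.eq_of_testBit_eq
      intro i
      by_cases hij : i = j
      · subst hij; simp [Nat.testBit_or, Nat.testBit_xor, hb]
      · simp [Nat.testBit_or, Nat.testBit_xor, Ne.symm hij]
  · rintro ⟨hb, rfl⟩
    constructor
    · simp [Nat.testBit_or]
    · exact pv_or_pow_xor hb
theorem pv_or_pow_inj {t j j' : Nat} (h : t.testBit j = false) (_h' : t.testBit j' = false)
    (e : t ||| 2 ^ j = t ||| 2 ^ j') : j = j' := by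
  have := congrArg (fun x => Nat.testBit x j) e
  simp [Nat.testBit_or, Nat.testBit_two_pow, h] at this
  omega
theorem pv_exists_testBit {m n : Nat} (h0 : m ≠ 0) (h : m < 2 ^ n) :
    ∃ j, j < n ∧ m.testBit j = true := by
  by_contra hc
  push Not at hc
  apply h0
  apply Nat.eq_of_testBit_eq
  intro i
  rw [Nat.zero_testBit]
  by_cases hi : i < n
  · have := hc i hi
    simpa using this
  · exact Nat.testBit_lt_two_pow (lt_of_lt_of_le h (Nat.pow_le_pow_right (by omega) (by omega)))
-- ---- the common value function: Gv = the pull recurrence both programs compute ----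
def pvG (c : Nat → Nat → Int) (n : Nat) : Nat → Nat → Option Int
  | 0, _ => none
  | fuel+1, m =>
    if m = 0 then some 0
    else pvFoldMin (fun j => Option.map (fun v => v + c (pvBC m - 1) j) (pvG c n fuel (m ^^^ 2 ^ j)))
      (fun j => m.testBit j) (List.range n) none

def pvGv (c : Nat → Nat → Int) (n : Nat) (m : Nat) : Option Int := pvG c n (pvBC m + 1) m

def pvCost (nums1 nums2 : List Int) (k j : Nat) : Int :=
  PySem.Int.bxor ((PySem.List.pyGet? nums1 (k : Int)).getD 0) ((PySem.List.pyGet? nums2 (j : Int)).getD 0)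

theorem pvG_fuel (c : Nat → Nat → Int) (n : Nat) :
    ∀ fuel fuel' m, pvBC m < fuel → pvBC m < fuel' → pvG c n fuel m = pvG c n fuel' m := by
  intro fuel
  induction fuel with
  | zero => intro fuel' m h; omega
  | succ fuel ih =>
    intro fuel' m h h'
    match fuel', h' with
    | fuel'+1, h' =>
      show pvG c n (fuel+1) m = pvG c n (fuel'+1) m
      rw [pvG, pvG]
      by_cases hm : m = 0
      · simp [hm]
      · simp only [if_neg hm]
        refine pvFoldMin_congr (fun j _ => rfl) (fun j _ hb => ?_)
        have hx := pvBC_xor_pow (m := m) (j := j) hb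
        rw [ih fuel' (m ^^^ 2 ^ j) (by omega) (by omega)]

theorem pvGv_zero (c : Nat → Nat → Int) (n : Nat) : pvGv c n 0 = some 0 := by
  rw [pvGv, pvBC_zero, pvG]
  simp

theorem pvGv_rec (c : Nat → Nat → Int) (n : Nat) {m : Nat} (h : m ≠ 0) :
    pvGv c n m = pvFoldMin (fun j => Option.map (fun v => v + c (pvBC m - 1) j) (pvGv c n (m ^^^ 2 ^ j)))
      (fun j => m.testBit j) (List.range n) none := by
  rw [pvGv, pvG, if_neg h]
  refine pvFoldMin_congr (fun j _ => rfl) (fun j _ hb => ?_)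
  have hx := pvBC_xor_pow (m := m) (j := j) hb
  rw [pvG_fuel c n (pvBC m) (pvBC (m ^^^ 2 ^ j) + 1) (m ^^^ 2 ^ j) (by omega) (by omega), pvGv]

theorem pvGv_isSome (c : Nat → Nat → Int) (n : Nat) :
    ∀ m, m < 2 ^ n → (pvGv c n m).isSome := by
  intro m
  induction m using Nat.strongRecOn with
  | _ m ih =>
    intro hm
    by_cases h0 : m = 0
    · subst h0; rw [pvGv_zero]; rfl
    · rw [pvGv_rec c n h0]
      obtain ⟨j, hj, hb⟩ := pv_exists_testBit h0 hm
      refine pvFoldMin_isSome (List.mem_range.mpr hj) hb ?_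
      have hlt := pv_xor_pow_lt (m := m) (j := j) hb
      have := ih (m ^^^ 2 ^ j) hlt (by omega)
      simpa using this

-- ---- partially-propagated table values (A's outer-loop invariant) ----
def pvD (c : Nat → Nat → Int) (n t m : Nat) : Option Int :=
  if m = 0 then some 0
  else pvFoldMin (fun j => Option.map (fun v => v + c (pvBC m - 1) j) (pvGv c n (m ^^^ 2 ^ j)))
    (fun j => m.testBit j && decide (m ^^^ 2 ^ j < t)) (List.range n) none

theorem pvD_zero (c : Nat → Nat → Int) (n m : Nat) :
    pvD c n 0 m = if m = 0 then some 0 else none := by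
  rw [pvD]
  by_cases h0 : m = 0
  · simp [h0]
  · rw [if_neg h0, if_neg h0]
    exact pvFoldMin_false (fun j _ => by simp)

theorem pvD_all (c : Nat → Nat → Int) (n t m : Nat)
    (h : ∀ j, j < n → m.testBit j = true → m ^^^ 2 ^ j < t) : pvD c n t m = pvGv c n m := by
  by_cases h0 : m = 0
  · subst h0; rw [pvD, if_pos rfl, pvGv_zero]
  · rw [pvD, if_neg h0, pvGv_rec c n h0]
    refine pvFoldMin_congr (fun j hj => ?_) (fun _ _ _ => rfl)
    by_cases hb : m.testBit j
    · simp [hb, h j (List.mem_range.mp hj) hb]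
    · simp [hb]

theorem pvD_succ_hit (c : Nat → Nat → Int) (n t m : Nat) {j0 : Nat} (hj : j0 < n)
    (hb : m.testBit j0 = true) (hs : m ^^^ 2 ^ j0 = t) :
    pvD c n (t+1) m = pvMinO (pvD c n t m) (Option.map (fun v => v + c (pvBC m - 1) j0) (pvGv c n t)) := by
  have h0 : m ≠ 0 := by
    intro h; subst h; simp [Nat.zero_testBit] at hb
  rw [pvD, if_neg h0, pvD, if_neg h0, ← hs]
  refine pvFoldMin_insert List.nodup_range (List.mem_range.mpr hj) ?_ ?_ ?_
  · simp [hb, hs]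
  · simp [hb, hs]
  · intro j _ hne
    by_cases hbj : m.testBit j
    · have hne2 : m ^^^ 2 ^ j ≠ m ^^^ 2 ^ j0 := by
        intro e
        have e2 : (2 : Nat) ^ j = 2 ^ j0 := by
          have := congrArg (fun x => m ^^^ x) e
          simpa [← Nat.xor_assoc] using this
        exact hne (Nat.pow_right_injective (by omega) e2)
      simp only [hbj, Bool.true_and]
      rw [decide_eq_decide]
      omega
    · simp [hbj]

theorem pvD_succ_miss (c : Nat → Nat → Int) (n t m : Nat)
    (h : ∀ j, j < n → m.testBit j = true → m ^^^ 2 ^ j ≠ t) : pvD c n (t+1) m = pvD c n t m := by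
  by_cases h0 : m = 0
  · simp [pvD, h0]
  · rw [pvD, if_neg h0, pvD, if_neg h0]
    refine pvFoldMin_congr (fun j hj => ?_) (fun _ _ _ => rfl)
    by_cases hb : m.testBit j
    · have hne := h j (List.mem_range.mp hj) hb
      simp only [hb, Bool.true_and]
      rw [decide_eq_decide]
      omega
    · simp [hb]
-- ---- A side: the forward table fold computes pvD ----
theorem pv_getD_set_self {l : List (Option Int)} {i : Nat} (h : i < l.length) (v : Option Int) :
    (l.set i v).getD i none = v := by
  rw [List.getD_eq_getElem?_getD, List.getElem?_set, if_pos rfl, if_pos h]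
  rfl
theorem pv_getD_set_ne {l : List (Option Int)} {i m : Nat} (h : m ≠ i) (v : Option Int) :
    (l.set i v).getD m none = l.getD m none := by
  rw [List.getD_eq_getElem?_getD, List.getElem?_set, if_neg (Ne.symm h), ← List.getD_eq_getElem?_getD]
theorem pv_getD_replicate (k m : Nat) : (List.replicate k (none : Option Int)).getD m none = none := by
  rw [List.getD_eq_getElem?_getD, List.getElem?_replicate]
  split <;> rfl

-- the body of A's inner loop, named (definitionally equal to the lambda in pvStepA with i = pvBC t)
def pvInner (nums1 nums2 : List Int) (t : Nat) (dp : List (Option Int)) (j : Nat) : List (Option Int) :=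
  if t.testBit j then dp
  else
    dp.set (t ||| (1 <<< j)) (pvMinO (dp.getD (t ||| (1 <<< j)) none)
      (Option.map (fun v => v + pvCost nums1 nums2 (pvBC t) j) (dp.getD t none)))

theorem pvStepA_skip (nums1 nums2 : List Int) (n : Nat) (dp : List (Option Int)) (t : Nat)
    (h : n ≤ pvBC t) : pvStepA nums1 nums2 n dp t = dp := by
  have h' : n ≤ PySem.Int.bitCount (t : Int) := h
  rw [pvStepA, if_pos h']
theorem pvStepA_run (nums1 nums2 : List Int) (n : Nat) (dp : List (Option Int)) (t : Nat)
    (hng : ¬ n ≤ pvBC t) : pvStepA nums1 nums2 n dp t = (List.range n).foldl (pvInner nums1 nums2 t) dp := by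
  have h' : ¬ n ≤ PySem.Int.bitCount (t : Int) := hng
  rw [pvStepA, if_neg h']
  rfl

theorem pv_ne_or_pow {t j : Nat} (h : t.testBit j = false) : t ≠ t ||| 2 ^ j := by
  intro e
  have : (t ||| 2 ^ j).testBit j = true := by simp [Nat.testBit_or]
  rw [← e, h] at this
  exact Bool.false_ne_true this

theorem L_inner (nums1 nums2 : List Int) (n t : Nat) (dp : List (Option Int))
    (hlen : dp.length = 2 ^ n) (ht : t < 2 ^ n) :
    ∀ k, k ≤ n →
      (((List.range k).foldl (pvInner nums1 nums2 t) dp).length = 2 ^ n) ∧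
      (∀ j, j < k → t.testBit j = false →
        ((List.range k).foldl (pvInner nums1 nums2 t) dp).getD (t ||| 2 ^ j) none
          = pvMinO (dp.getD (t ||| 2 ^ j) none)
              (Option.map (fun v => v + pvCost nums1 nums2 (pvBC t) j) (dp.getD t none))) ∧
      (∀ m, (∀ j, j < k → t.testBit j = false → m ≠ t ||| 2 ^ j) →
        ((List.range k).foldl (pvInner nums1 nums2 t) dp).getD m none = dp.getD m none) := by
  intro k
  induction k with
  | zero => intro _; exact ⟨hlen, fun j hj _ => by omega, fun m _ => rfl⟩
  | succ k ih =>
    intro hk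
    obtain ⟨iha, ihb, ihc⟩ := ih (by omega)
    rw [List.range_succ, List.foldl_append, List.foldl_cons, List.foldl_nil]
    set dpk := (List.range k).foldl (pvInner nums1 nums2 t) dp with hdpk
    by_cases hb : t.testBit k
    · rw [pvInner, if_pos hb]
      refine ⟨iha, fun j hj hbf => ?_, fun m hm => ?_⟩
      · rcases Nat.lt_succ_iff_lt_or_eq.mp hj with hj' | rfl
        · exact ihb j hj' hbf
        · rw [hbf] at hb; exact absurd hb (by simp)
      · exact ihc m (fun j hj hbf => hm j (by omega) hbf)
    · rw [pvInner, if_neg hb, Nat.one_shiftLeft]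
      have hb' : t.testBit k = false := by simpa using hb
      have hkn : k < n := by omega
      have hm0 : t ||| 2 ^ k < 2 ^ n :=
        Nat.or_lt_two_pow ht (lt_of_lt_of_le (Nat.pow_lt_pow_right (by omega) hkn) (le_refl _))
      have hdt : dpk.getD t none = dp.getD t none :=
        ihc t (fun j _ hbf => pv_ne_or_pow hbf)
      have hdm0 : dpk.getD (t ||| 2 ^ k) none = dp.getD (t ||| 2 ^ k) none :=
        ihc (t ||| 2 ^ k) (fun j hj hbf e => by
          have := pv_or_pow_inj hbf hb' e.symm
          omega)
      refine ⟨by rw [List.length_set]; exact iha, fun j hj hbf => ?_, fun m hm => ?_⟩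
      · rcases Nat.lt_succ_iff_lt_or_eq.mp hj with hj' | rfl
        · have hne : t ||| 2 ^ j ≠ t ||| 2 ^ k := fun e => by
            have := pv_or_pow_inj hbf hb' e
            omega
          rw [pv_getD_set_ne hne, ihb j hj' hbf]
        · rw [pv_getD_set_self (by rw [iha]; exact hm0), hdt, hdm0]
      · have hne : m ≠ t ||| 2 ^ k := hm k (by omega) hb'
        rw [pv_getD_set_ne hne]
        exact ihc m (fun j hj hbf => hm j (by omega) hbf)

theorem L_step (nums1 nums2 : List Int) (n t : Nat) (dp : List (Option Int))
    (hlen : dp.length = 2 ^ n)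
    (hinv : ∀ m, m < 2 ^ n → dp.getD m none = pvD (pvCost nums1 nums2) n t m) (ht : t < 2 ^ n) :
    (pvStepA nums1 nums2 n dp t).length = 2 ^ n ∧
    ∀ m, m < 2 ^ n → (pvStepA nums1 nums2 n dp t).getD m none = pvD (pvCost nums1 nums2) n (t+1) m := by
  by_cases hg : n ≤ pvBC t
  · rw [pvStepA_skip _ _ _ _ _ hg]
    have hfull : t = 2 ^ n - 1 := pvBC_ge_full ht hg
    refine ⟨hlen, fun m hm => ?_⟩
    rw [hinv m hm, pvD_succ_miss]
    intro j hj hbm e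
    have : (m ^^^ 2 ^ j).testBit j = false := by
      simp [Nat.testBit_xor, hbm]
    rw [e, hfull] at this
    rw [Nat.testBit_two_pow_sub_one] at this
    simp [hj] at this
  · rw [pvStepA_run _ _ _ _ _ hg]
    obtain ⟨ha, hb, hc⟩ := L_inner nums1 nums2 n t dp hlen ht n (le_refl n)
    have hdt : dp.getD t none = pvGv (pvCost nums1 nums2) n t := by
      rw [hinv t ht, pvD_all]
      intro j _ hbt
      exact pv_xor_pow_lt hbt
    refine ⟨ha, fun m hm => ?_⟩
    by_cases hx : ∃ j, j < n ∧ t.testBit j = false ∧ m = t ||| 2 ^ j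
    · obtain ⟨j0, hj0, hbf, rfl⟩ := hx
      have hst := pv_src_target.mpr ⟨hbf, rfl⟩
      rw [hb j0 hj0 hbf, hdt, hinv _ hm,
        pvD_succ_hit (pvCost nums1 nums2) n t _ hj0 hst.1 hst.2]
      have hbc : pvBC (t ||| 2 ^ j0) = pvBC t + 1 := pvBC_or_pow hbf
      rw [hbc]
      simp
    · rw [hc m (fun j hj hbf e => hx ⟨j, hj, hbf, e⟩), hinv m hm, pvD_succ_miss]
      intro j hj hbm e
      exact hx ⟨j, hj, (pv_src_target.mp ⟨hbm, e⟩).1, (pv_src_target.mp ⟨hbm, e⟩).2⟩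

theorem L_outer (nums1 nums2 : List Int) (n : Nat) :
    ∀ t, t ≤ 2 ^ n →
      (((List.range t).foldl (pvStepA nums1 nums2 n)
          ((List.replicate (2 ^ n) (none : Option Int)).set 0 (some 0))).length = 2 ^ n) ∧
      ∀ m, m < 2 ^ n →
        ((List.range t).foldl (pvStepA nums1 nums2 n)
            ((List.replicate (2 ^ n) (none : Option Int)).set 0 (some 0))).getD m none
          = pvD (pvCost nums1 nums2) n t m := by
  intro t
  induction t with
  | zero =>
    intro _
    refine ⟨by simp, fun m hm => ?_⟩
    rw [List.range_zero, List.foldl_nil, pvD_zero]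
    by_cases h0 : m = 0
    · subst h0
      rw [pv_getD_set_self (by simp), if_pos rfl]
    · rw [pv_getD_set_ne h0, pv_getD_replicate, if_neg h0]
  | succ t ih =>
    intro ht
    obtain ⟨iha, ihb⟩ := ih (by omega)
    rw [List.range_succ, List.foldl_append, List.foldl_cons, List.foldl_nil]
    exact L_step nums1 nums2 n t _ iha ihb (by omega)

theorem L_A (nums1 nums2 : List Int) :
    minimumXORSum nums1 nums2
      = (pvGv (pvCost nums1 nums2) nums1.length (2 ^ nums1.length - 1)).getD 0 := by
  rw [minimumXORSum]
  simp only [Nat.one_shiftLeft]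
  set n := nums1.length
  obtain ⟨ha, hb⟩ := L_outer nums1 nums2 n (2 ^ n) (le_refl _)
  have hfull : 2 ^ n - 1 < 2 ^ n := by
    have := Nat.two_pow_pos n
    omega
  rw [hb (2 ^ n - 1) hfull, pvD_all]
  intro j hj hbt
  have := pv_xor_pow_lt hbt
  omega
-- ---- B side: the memoized recursion computes pvGv ----
def pvGood (c : Nat → Nat → Int) (n : Nat) (memo : PySem.Dict Nat Int) : Prop :=
  ∀ m v, PySem.Dict.get? memo m = some v → pvGv c n m = some v

theorem pvGood_insert {c : Nat → Nat → Int} {n : Nat} {memo : PySem.Dict Nat Int} {k : Nat} {v : Int}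
    (hG : pvGood c n memo) (hv : pvGv c n k = some v) : pvGood c n (PySem.Dict.insert memo k v) := by
  intro m w hm
  by_cases hmk : m = k
  · subst hmk
    rw [PySem.Dict.get?_insert_self] at hm
    cases hm
    exact hv
  · rw [PySem.Dict.get?_insert_of_ne _ _ hmk] at hm
    exact hG m w hm

theorem L_B_fold (nums1 nums2 : List Int) (n : Nat) (fuel mask : Nat)
    (ihf : ∀ mask' memo', pvGood (pvCost nums1 nums2) n memo' → mask' < 2 ^ n → pvBC mask' < fuel →
      pvGv (pvCost nums1 nums2) n mask' = some ((pvSolveB nums1 nums2 n fuel mask' memo').1) ∧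
      pvGood (pvCost nums1 nums2) n ((pvSolveB nums1 nums2 n fuel mask' memo').2))
    (hlt : mask < 2 ^ n) (hfe : pvBC mask ≤ fuel) :
    ∀ (l : List Nat) (st : Option Int × PySem.Dict Nat Int), pvGood (pvCost nums1 nums2) n st.2 →
      pvGood (pvCost nums1 nums2) n ((l.foldl (fun (st : Option Int × PySem.Dict Nat Int) j =>
        if mask.testBit j then
          (some (match st.1 with
            | none => PySem.Int.bxor ((PySem.List.pyGet? nums1 ((PySem.Int.bitCount (mask : Int) : Int) - 1)).getD 0)
                        ((PySem.List.pyGet? nums2 (j : Int)).getD 0)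
                      + (pvSolveB nums1 nums2 n fuel (mask ^^^ (1 <<< j)) st.2).1
            | some b => min b (PySem.Int.bxor ((PySem.List.pyGet? nums1 ((PySem.Int.bitCount (mask : Int) : Int) - 1)).getD 0)
                        ((PySem.List.pyGet? nums2 (j : Int)).getD 0)
                      + (pvSolveB nums1 nums2 n fuel (mask ^^^ (1 <<< j)) st.2).1)),
           (pvSolveB nums1 nums2 n fuel (mask ^^^ (1 <<< j)) st.2).2)
        else st) st).2) ∧
      ((l.foldl (fun (st : Option Int × PySem.Dict Nat Int) j =>
        if mask.testBit j then
          (some (match st.1 with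
            | none => PySem.Int.bxor ((PySem.List.pyGet? nums1 ((PySem.Int.bitCount (mask : Int) : Int) - 1)).getD 0)
                        ((PySem.List.pyGet? nums2 (j : Int)).getD 0)
                      + (pvSolveB nums1 nums2 n fuel (mask ^^^ (1 <<< j)) st.2).1
            | some b => min b (PySem.Int.bxor ((PySem.List.pyGet? nums1 ((PySem.Int.bitCount (mask : Int) : Int) - 1)).getD 0)
                        ((PySem.List.pyGet? nums2 (j : Int)).getD 0)
                      + (pvSolveB nums1 nums2 n fuel (mask ^^^ (1 <<< j)) st.2).1)),
           (pvSolveB nums1 nums2 n fuel (mask ^^^ (1 <<< j)) st.2).2)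
        else st) st).1
        = pvFoldMin (fun j => Option.map (fun v => v + pvCost nums1 nums2 (pvBC mask - 1) j)
            (pvGv (pvCost nums1 nums2) n (mask ^^^ 2 ^ j))) (fun j => mask.testBit j) l st.1) := by
  intro l
  induction l with
  | nil => intro st h; exact ⟨h, rfl⟩
  | cons j l ih =>
    intro st hst
    rw [List.foldl_cons, pvFoldMin_cons]
    by_cases hb : mask.testBit j
    · simp only [hb, if_true]
      have h0 : mask ≠ 0 := by
        intro e; subst e; rw [Nat.zero_testBit] at hb; exact Bool.false_ne_true hb
      have hsub_lt : mask ^^^ 2 ^ j < 2 ^ n := lt_trans (pv_xor_pow_lt hb) hlt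
      have hbc := pvBC_xor_pow (m := mask) (j := j) hb
      have hsub_fe : pvBC (mask ^^^ 2 ^ j) < fuel := by omega
      rw [Nat.one_shiftLeft]
      obtain ⟨hval, hgood⟩ := ihf (mask ^^^ 2 ^ j) st.2 hst hsub_lt hsub_fe
      have hcast : ((PySem.Int.bitCount (mask : Int) : Int) - 1) = (((pvBC mask - 1 : Nat)) : Int) := by
        have h1 := pvBC_pos h0
        have h2 : (1 : Int) ≤ ((pvBC mask : Nat) : Int) := by exact_mod_cast h1
        rw [pvBC] at *
        omega
      have hih := ih ⟨some (match st.1 with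
          | none => PySem.Int.bxor ((PySem.List.pyGet? nums1 ((PySem.Int.bitCount (mask : Int) : Int) - 1)).getD 0) ((PySem.List.pyGet? nums2 (j : Int)).getD 0) + (pvSolveB nums1 nums2 n fuel (mask ^^^ 2 ^ j) st.2).1
          | some b => min b (PySem.Int.bxor ((PySem.List.pyGet? nums1 ((PySem.Int.bitCount (mask : Int) : Int) - 1)).getD 0) ((PySem.List.pyGet? nums2 (j : Int)).getD 0) + (pvSolveB nums1 nums2 n fuel (mask ^^^ 2 ^ j) st.2).1)),
          (pvSolveB nums1 nums2 n fuel (mask ^^^ 2 ^ j) st.2).2⟩ hgood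
      obtain ⟨hG2, hF⟩ := hih
      refine ⟨hG2, ?_⟩
      rw [hF, hval]
      simp only [Option.map_some]
      rw [hcast]
      congr 1
      cases st.1 <;> simp [pvMinO, pvCost, Int.add_comm]
    · simp only [hb, Bool.false_eq_true, if_false]
      exact ih st hst

theorem L_B (nums1 nums2 : List Int) (n : Nat) :
    ∀ fuel mask memo, pvGood (pvCost nums1 nums2) n memo → mask < 2 ^ n → pvBC mask < fuel →
      pvGv (pvCost nums1 nums2) n mask = some ((pvSolveB nums1 nums2 n fuel mask memo).1) ∧
      pvGood (pvCost nums1 nums2) n ((pvSolveB nums1 nums2 n fuel mask memo).2) := by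
  intro fuel
  induction fuel with
  | zero => intro mask memo _ _ h; omega
  | succ fuel ihf =>
    intro mask memo hGood hlt hfe
    rw [pvSolveB]
    cases hget : PySem.Dict.get? memo mask with
    | some v =>
      simp only
      exact ⟨hGood mask v hget, hGood⟩
    | none =>
      simp only
      obtain ⟨hG2, hF⟩ := L_B_fold nums1 nums2 n fuel mask ihf hlt (by omega) (List.range n) (none, memo) hGood
      rw [hF]
      have hn : (((none : Option Int), memo)).1 = (none : Option Int) := rfl
      rw [hn]
      by_cases h0 : mask = 0
      · subst h0
        rw [pvFoldMin_false (fun j _ => by rw [Nat.zero_testBit])]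
        exact ⟨by rw [pvGv_zero]; rfl, pvGood_insert hG2 (by rw [pvGv_zero]; rfl)⟩
      · rw [(pvGv_rec (pvCost nums1 nums2) n h0).symm]
        obtain ⟨b, hb2⟩ := Option.isSome_iff_exists.mp (pvGv_isSome (pvCost nums1 nums2) n mask hlt)
        rw [hb2]
        exact ⟨rfl, pvGood_insert hG2 (by rw [hb2]; rfl)⟩

theorem L_alt (nums1 nums2 : List Int) :
    minimumXORSum_alt nums1 nums2
      = (pvGv (pvCost nums1 nums2) nums1.length (2 ^ nums1.length - 1)).getD 0 := by
  rw [minimumXORSum_alt]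
  simp only [Nat.one_shiftLeft]
  set n := nums1.length
  have hGood : pvGood (pvCost nums1 nums2) n (PySem.Dict.insert PySem.Dict.empty 0 0) := by
    intro m v hm
    by_cases hm0 : m = 0
    · subst hm0
      rw [PySem.Dict.get?_insert_self] at hm
      cases hm
      exact pvGv_zero _ _
    · rw [PySem.Dict.get?_insert_of_ne _ _ hm0, PySem.Dict.get?_empty] at hm
      cases hm
  have hfull : 2 ^ n - 1 < 2 ^ n := by
    have := Nat.two_pow_pos n
    omega
  have hbc : pvBC (2 ^ n - 1) < n + 1 := by
    rw [pvBC_full]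
    omega
  obtain ⟨hval, _⟩ := L_B nums1 nums2 n (n + 1) (2 ^ n - 1) _ hGood hfull hbc
  rw [hval]
  rfl
-- ===== VERDICT (by name: the statement is the Claim_ definition above) =====
theorem minimumXORSum_spec : Claim_equal_minimumXORSum := by
  intro nums1 nums2 _ _
  unfold Spec_minimumXORSum
  rw [L_A, L_alt]
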